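-- pv_equiv track=rewrite | github.com/Lightblues/Leetcode | interview-list/230909-面试题/230415-tencent-1.py | f
-- ===== SOURCE A (Python) =====
-- from collections import Counter, defaultdict
--
-- def f(s, k):
--     cnt = Counter(s)
--     toDelete = defaultdict(int)
--     for ch,c in sorted(cnt.items()):
--         t = min(k, c)
--         toDelete[ch] = t
--         k -= t
--         if k==0: break
--     ans = []
--     for c in s:
--         if toDelete[c]>0:
--             toDelete[c] -= 1
--         else: ans.append(c)
--     return "".join(ans)
-- ===== SOURCE B (Python) =====
-- def f(s, k):
--     # Keep position i iff its stable rank (number of strictly smaller characters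
--     # anywhere, plus equal characters seen earlier) is at least k.
--     smaller = {c: sum(1 for d in s if d < c) for c in set(s)}
--     seen = {}
--     out = []
--     for c in s:
--         e = seen.get(c, 0)
--         if smaller[c] + e >= k:
--             out.append(c)
--         seen[c] = e + 1
--     return "".join(out)
-- ===== Notes on version B (the rewrite author's own statement) =====
-- stated objective: alternative
-- what changed: B drops A's Counter, sorted per-char deletion-budget loop and budget-decrementing scan, and instead keeps position i iff its stable rank (precomputed count of strictly smaller characters anywhere, plus a running count of equal characters seen earlier) is at least k.
import Mathlib
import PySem

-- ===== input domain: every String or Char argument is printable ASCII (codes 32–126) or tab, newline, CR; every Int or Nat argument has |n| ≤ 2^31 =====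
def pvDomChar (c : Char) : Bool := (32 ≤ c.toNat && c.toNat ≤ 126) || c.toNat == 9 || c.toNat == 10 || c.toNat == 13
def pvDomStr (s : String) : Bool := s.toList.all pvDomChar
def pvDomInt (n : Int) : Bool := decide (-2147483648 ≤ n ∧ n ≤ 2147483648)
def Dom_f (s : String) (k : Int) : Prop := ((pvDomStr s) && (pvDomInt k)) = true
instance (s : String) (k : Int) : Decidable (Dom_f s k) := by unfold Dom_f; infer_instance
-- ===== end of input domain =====

-- B replaces A's Counter + per-char deletion-budget loop + mutating scan by a direct
-- stable-rank test per position (alternative decomposition, not claimed faster).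

-- ===== PORT A =====
-- first loop of A: over sorted(cnt.items()), threading (toDelete, k), with break when k == 0
def aLoop : List (Char × Int) → PySem.Dict Char Int → Int → PySem.Dict Char Int × Int
  | [], td, k => (td, k)
  | (ch, c) :: rest, td, k =>
    let t := min k c
    let td' := td.insert ch t
    let k' := k - t
    if k' == 0 then (td', k') else aLoop rest td' k'

-- second loop of A; toDelete is a defaultdict(int): reading an absent key yields 0 and its
-- implicit 0-insertion never changes any later getD, so it is ported with getD/insert.
def aEmit : List Char → PySem.Dict Char Int → List Char → List Char
  | [], _, ans => ans
  | c :: rest, td, ans =>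
    if td.getD c 0 > 0 then aEmit rest (td.insert c (td.getD c 0 - 1)) ans
    else aEmit rest td (ans ++ [c])

-- sorted(cnt.items()): Counter keys are distinct, so Python's lexicographic tuple
-- comparison never reaches the second component; ported exactly as a sort keyed on fst.
def f (s : String) (k : Int) : String :=
  let cnt := PySem.Dict.counter s.toList
  let items := PySem.List.sorted cnt.items (fun p => p.1) false
  let td := (aLoop items PySem.Dict.empty k).1
  String.mk (aEmit s.toList td [])

-- ===== PORT B =====
-- {c: sum(1 for d in s if d < c) for c in set(s)}; only looked up by key afterwards,
-- so Python's unspecified set iteration order is immaterial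
def bSmaller (cs : List Char) : PySem.Dict Char Int :=
  (PySem.Set.ofList cs).foldl
    (fun d c => d.insert c ((cs.countP (fun x => decide (x < c)) : Int))) PySem.Dict.empty

-- loop of B over s, threading the running dict `seen`
def bGo (smaller : PySem.Dict Char Int) (k : Int) : List Char → PySem.Dict Char Int → List Char
  | [], _ => []
  | c :: rest, seen =>
    let e := seen.getD c 0
    if smaller.getD c 0 + e ≥ k
    then c :: bGo smaller k rest (seen.insert c (e + 1))
    else bGo smaller k rest (seen.insert c (e + 1))

def f_alt (s : String) (k : Int) : String :=
  let smaller := bSmaller s.toList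
  String.mk (bGo smaller k s.toList PySem.Dict.empty)

-- ===== PRECONDITION & SPEC =====
def Spec_f (s : String) (k : Int) (out : String) : Prop := out = f_alt s k
instance (s : String) (k : Int) (out : String) : Decidable (Spec_f s k out) := by unfold Spec_f; infer_instance

-- ===== CLAIM (what is proved, stated in full; the proofs are below) =====
def Claim_equal_f : Prop := ∀ (s : String) (k : Int), Dom_f s k → Spec_f s k (f s k)

-- ===== LEMMAS AND PROOFS =====

lemma aLoop_not_mem (items : List (Char × Int)) (td : PySem.Dict Char Int) (k : Int)
    (c : Char) (h : ∀ p ∈ items, p.1 ≠ c) :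
    (aLoop items td k).1.getD c 0 = td.getD c 0 := by
  induction items generalizing td k with
  | nil => rfl
  | cons p rest ih =>
    obtain ⟨ch, cc⟩ := p
    have hne : c ≠ ch := fun hEq => (h (ch, cc) (by simp)) (by simp [hEq])
    simp only [aLoop]
    split
    · rw [PySem.Dict.getD_insert]; rw [if_neg hne]
    · rw [ih _ _ (fun q hq => h q (List.mem_cons_of_mem _ hq))]
      rw [PySem.Dict.getD_insert]; rw [if_neg hne]

lemma aLoop_getD (cnt : Char → Int) :
    ∀ (L : List Char) (td : PySem.Dict Char Int) (k : Int), 0 ≤ k →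
      L.Pairwise (· < ·) → (∀ c ∈ L, 1 ≤ cnt c) → (∀ c ∈ L, td.getD c 0 = 0) →
      ∀ c ∈ L, (aLoop (L.map (fun d => (d, cnt d))) td k).1.getD c 0
        = min (cnt c) (max 0 (k - ((L.filter (fun d => decide (d < c))).map cnt).sum)) := by
  intro L
  induction L with
  | nil => intro td k _ _ _ _ c hc; cases hc
  | cons c0 tl ih =>
    intro td k hk hpair hcnt htd c hc
    obtain ⟨hlt0, hpairtl⟩ := List.pairwise_cons.mp hpair
    have hcnt0 : 1 ≤ cnt c0 := hcnt c0 (by simp)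
    have hsumtl : 0 ≤ ((tl.filter (fun d => decide (d < c))).map cnt).sum := by
      apply List.sum_nonneg
      intro x hx
      obtain ⟨d, hd, rfl⟩ := List.mem_map.mp hx
      exact le_trans (by norm_num) (hcnt d (by simp [(List.mem_filter.mp hd).1]))
    simp only [List.map_cons, aLoop]
    split
    · next hbr =>
      have hbr' : k - min k (cnt c0) = 0 := by simpa using hbr
      have hkle : k ≤ cnt c0 := by omega
      rcases List.mem_cons.mp hc with hc | hc
      · subst hc
        have hfil : (c :: tl).filter (fun d => decide (d < c)) = [] := by
          simp only [List.filter_cons]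
          simp only [lt_self_iff_false, decide_false]
          exact List.filter_eq_nil_iff.mpr (fun d hd => by simp [asymm (hlt0 d hd)])
        rw [hfil, PySem.Dict.getD_insert_self]
        simp only [List.map_nil, List.sum_nil]
        omega
      · have hne : c ≠ c0 := fun hEq => absurd (hEq ▸ hlt0 c hc) (lt_irrefl c)
        rw [PySem.Dict.getD_insert, if_neg hne, htd c (by simp [hc])]
        have hfil : (c0 :: tl).filter (fun d => decide (d < c)) =
            c0 :: tl.filter (fun d => decide (d < c)) := by
          simp [hlt0 c hc]
        rw [hfil]
        simp only [List.map_cons, List.sum_cons]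
        have h1 : 1 ≤ cnt c := hcnt c (by simp [hc])
        omega
    · next hbr =>
      have hbr' : ¬ (k - min k (cnt c0) = 0) := by simpa using hbr
      have hklt : cnt c0 < k := by omega
      have htmin : min k (cnt c0) = cnt c0 := by omega
      rw [htmin]
      rcases List.mem_cons.mp hc with hc | hc
      · subst hc
        have hfil : (c :: tl).filter (fun d => decide (d < c)) = [] := by
          simp only [List.filter_cons]
          simp only [lt_self_iff_false, decide_false]
          exact List.filter_eq_nil_iff.mpr (fun d hd => by simp [asymm (hlt0 d hd)])
        rw [aLoop_not_mem _ _ _ _ (by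
          intro p hp
          obtain ⟨d, hd, rfl⟩ := List.mem_map.mp hp
          exact fun hEq => absurd (hEq ▸ hlt0 d hd) (lt_irrefl c))]
        rw [PySem.Dict.getD_insert_self, hfil]
        simp only [List.map_nil, List.sum_nil]
        omega
      · have hne : c ≠ c0 := fun hEq => absurd (hEq ▸ hlt0 c hc) (lt_irrefl c)
        rw [ih _ _ (by omega) hpairtl (fun d hd => hcnt d (by simp [hd]))
            (fun d hd => by
              by_cases hdc : d = c0
              · exact absurd (hdc ▸ hlt0 d hd) (hdc ▸ lt_irrefl c0)
              · rw [PySem.Dict.getD_insert, if_neg hdc]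
                exact htd d (by simp [hd])) c hc]
        have hfil : (c0 :: tl).filter (fun d => decide (d < c)) =
            c0 :: tl.filter (fun d => decide (d < c)) := by
          simp [hlt0 c hc]
        rw [hfil]
        simp only [List.map_cons, List.sum_cons]
        omega

lemma items_sorted (cs : List Char) :
    PySem.List.sorted (PySem.Dict.counter cs).items (fun p => p.1) false
      = (PySem.List.sorted (PySem.Set.ofList cs) (fun x => x) false).map
          (fun c => (c, (cs.count c : Int))) := by
  apply PySem.List.sorted_eq_of_perm_of_pairwise_lt
  · rw [PySem.Dict.items_counter]
    exact (PySem.List.sorted_perm _ _ _).map _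
  · exact (PySem.List.sorted_ofList_pairwise_lt _).map _ (fun a b h => h)

lemma sum_filter_count (cs : List Char) (c : Char) :
    (((PySem.List.sorted (PySem.Set.ofList cs) (fun x => x) false).filter
        (fun d => decide (d < c))).map (fun d => (cs.count d : Int))).sum
      = (cs.countP (fun d => decide (d < c)) : Int) := by
  have hnodup : (PySem.List.sorted (PySem.Set.ofList cs) (fun x => x) false).Nodup :=
    ((PySem.List.sorted_perm _ _ _).nodup_iff).mpr (PySem.Set.nodup_ofList cs)
  have hperm : (PySem.List.sorted (PySem.Set.ofList cs) (fun x => x) false).Perm cs.dedup :=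
    (List.perm_ext_iff_of_nodup hnodup cs.nodup_dedup).mpr
      (fun a => by simp [PySem.List.mem_sorted, PySem.Set.mem_ofList, List.mem_dedup])
  rw [List.Perm.sum_eq ((hperm.filter _).map _)]
  have hmm : (cs.dedup.filter (fun d => decide (d < c))).map (fun d => (cs.count d : Int))
      = ((cs.dedup.filter (fun d => decide (d < c))).map cs.count).map (Nat.cast) := by
    simp [List.map_map, Function.comp]
  rw [hmm, ← Nat.cast_list_sum, List.sum_map_count_dedup_filter_eq_countP]

lemma foldl_insert_getD {g : Char → Int} :
    ∀ (l : List Char) (d : PySem.Dict Char Int) (c : Char),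
      (l.foldl (fun d c => d.insert c (g c)) d).getD c 0
        = if c ∈ l then g c else d.getD c 0 := by
  intro l
  induction l with
  | nil => intro d c; simp
  | cons a tl ih =>
    intro d c
    simp only [List.foldl_cons]
    rw [ih]
    by_cases hctl : c ∈ tl
    · simp [hctl]
    · by_cases hca : c = a
      · subst hca
        simp [hctl, PySem.Dict.getD_insert_self]
      · simp [hctl, hca, PySem.Dict.getD_insert]

lemma bSmaller_getD (cs : List Char) (c : Char) (hc : c ∈ cs) :
    (bSmaller cs).getD c 0 = (cs.countP (fun d => decide (d < c)) : Int) := by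
  unfold bSmaller
  rw [foldl_insert_getD]
  rw [if_pos ((PySem.Set.mem_ofList _ _).mpr hc)]

lemma bSmaller_nonneg {cs : List Char} : ∀ c, 0 ≤ (bSmaller cs).getD c 0 := by
  intro c
  unfold bSmaller
  rw [foldl_insert_getD]
  split
  · exact Int.natCast_nonneg _
  · rw [PySem.Dict.getD_empty]

lemma emit_bridge (cs : List Char) (k : Int) (T : Char → Int) (smaller : PySem.Dict Char Int)
    (hsm : ∀ c ∈ cs, smaller.getD c 0 = (cs.countP (fun d => decide (d < c)) : Int))
    (hiff : ∀ c ∈ cs, ∀ occ : Int, 0 ≤ occ → occ < (cs.count c : Int) →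
        (T c ≤ occ ↔ k ≤ (cs.countP (fun d => decide (d < c)) : Int) + occ)) :
    ∀ (rest pref : List Char) (td seen : PySem.Dict Char Int) (ans : List Char),
      cs = pref ++ rest →
      (∀ c ∈ cs, td.getD c 0 = max 0 (T c - (pref.count c : Int))) →
      (∀ c ∈ cs, seen.getD c 0 = (pref.count c : Int)) →
      aEmit rest td ans = ans ++ bGo smaller k rest seen := by
  intro rest
  induction rest with
  | nil => intro pref td seen ans _ _ _; simp [aEmit, bGo]
  | cons c rest' ih =>
    intro pref td seen ans hsplit htd hseen
    have hc : c ∈ cs := by rw [hsplit]; simp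
    have hocc : (pref.count c : Int) < (cs.count c : Int) := by
      have : cs.count c = pref.count c + (c :: rest').count c := by
        rw [hsplit, List.count_append]
      rw [this]
      have : 1 ≤ (c :: rest').count c := by simp
      push_cast
      omega
    have hiffc := hiff c hc (pref.count c : Int) (by positivity) hocc
    have htdc := htd c hc
    have hseenc := hseen c hc
    have hseen' : ∀ c' ∈ cs, (seen.insert c (seen.getD c 0 + 1)).getD c' 0
        = (((pref ++ [c]).count c' : Nat) : Int) := by
      intro c' hc'
      by_cases hcc : c' = c
      · subst hcc
        rw [PySem.Dict.getD_insert_self, hseenc]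
        have h1 : (pref ++ [c']).count c' = pref.count c' + 1 := by simp
        rw [h1]
        push_cast
        omega
      · rw [PySem.Dict.getD_insert, if_neg hcc, hseen c' hc']
        have h1 : (pref ++ [c]).count c' = pref.count c' := by
          simp [List.count_append, Ne.symm hcc]
        rw [h1]
    simp only [aEmit, bGo, hsm c hc, hseenc]
    by_cases hkeep : T c ≤ (pref.count c : Int)
    · have hz : td.getD c 0 = 0 := by rw [htdc]; omega
      have hcond : k ≤ (cs.countP (fun d => decide (d < c)) : Int) + (pref.count c : Int) :=
        hiffc.mp hkeep
      rw [if_neg (by omega), if_pos (by omega)]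
      have := ih (pref ++ [c]) td (seen.insert c ((pref.count c : Int) + 1)) (ans ++ [c])
        (by simp [hsplit])
        (fun c' hc' => by
          rw [htd c' hc']
          by_cases hcc : c' = c
          · subst hcc
            have h1 : (pref ++ [c']).count c' = pref.count c' + 1 := by simp
            rw [h1]
            push_cast
            omega
          · have h1 : (pref ++ [c]).count c' = pref.count c' := by
              simp [List.count_append, Ne.symm hcc]
            rw [h1])
        (fun c' hc' => by rw [← hseenc]; exact hseen' c' hc')
      rw [this]
      simp [List.append_assoc]
    · have hpos : td.getD c 0 = T c - (pref.count c : Int) := by rw [htdc]; omega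
      have hcond : ¬ k ≤ (cs.countP (fun d => decide (d < c)) : Int) + (pref.count c : Int) :=
        fun h => hkeep (hiffc.mpr h)
      rw [if_pos (by omega), if_neg (by omega)]
      have := ih (pref ++ [c]) (td.insert c (td.getD c 0 - 1))
        (seen.insert c ((pref.count c : Int) + 1)) ans (by simp [hsplit])
        (fun c' hc' => by
          by_cases hcc : c' = c
          · subst hcc
            rw [PySem.Dict.getD_insert_self, hpos]
            have h1 : (pref ++ [c']).count c' = pref.count c' + 1 := by simp
            rw [h1]
            push_cast
            omega
          · rw [PySem.Dict.getD_insert, if_neg hcc, htd c' hc']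
            have h1 : (pref ++ [c]).count c' = pref.count c' := by
              simp [List.count_append, Ne.symm hcc]
            rw [h1])
        (fun c' hc' => by rw [← hseenc]; exact hseen' c' hc')
      rw [this]

lemma aEmit_keep_all : ∀ (rest : List Char) (td : PySem.Dict Char Int) (ans : List Char),
    (∀ c ∈ rest, td.getD c 0 ≤ 0) → aEmit rest td ans = ans ++ rest := by
  intro rest
  induction rest with
  | nil => intro td ans _; simp [aEmit]
  | cons c rest' ih =>
    intro td ans h
    have : ¬ td.getD c 0 > 0 := by have := h c (by simp); omega
    simp only [aEmit, if_neg this]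
    rw [ih td (ans ++ [c]) (fun d hd => h d (by simp [hd]))]
    simp

lemma bGo_keep_all (smaller : PySem.Dict Char Int) (k : Int) (hk : k < 0)
    (hsm : ∀ c, 0 ≤ smaller.getD c 0) :
    ∀ (rest : List Char) (seen : PySem.Dict Char Int),
      (∀ c, 0 ≤ seen.getD c 0) → bGo smaller k rest seen = rest := by
  intro rest
  induction rest with
  | nil => intro seen _; rfl
  | cons c rest' ih =>
    intro seen hseen
    simp only [bGo]
    rw [if_pos (by have h1 := hsm c; have h2 := hseen c; omega)]
    rw [ih _ (fun c' => by
      by_cases hcc : c' = c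
      · subst hcc
        rw [PySem.Dict.getD_insert_self]
        have := hseen c'
        omega
      · rw [PySem.Dict.getD_insert, if_neg hcc]
        exact hseen c')]

lemma f_eq (s : String) (k : Int) : f s k = f_alt s k := by
  have hA : f s k = String.mk (aEmit s.toList
      ((aLoop (PySem.List.sorted (PySem.Dict.counter s.toList).items (fun p => p.1) false)
        PySem.Dict.empty k).1) []) := rfl
  have hB : f_alt s k = String.mk (bGo (bSmaller s.toList) k s.toList PySem.Dict.empty) := rfl
  rw [hA, hB, items_sorted]
  by_cases hk : 0 ≤ k
  · -- main path: k ≥ 0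
    set cs := s.toList with hcs
    set L := PySem.List.sorted (PySem.Set.ofList cs) (fun x => x) false with hL
    have hmem : ∀ c, c ∈ L ↔ c ∈ cs := by
      intro c; rw [hL, PySem.List.mem_sorted, PySem.Set.mem_ofList]
    have hT : ∀ c ∈ cs, (aLoop (L.map (fun d => (d, (cs.count d : Int)))) PySem.Dict.empty k).1.getD c 0
        = min ((cs.count c : Int)) (max 0 (k - (cs.countP (fun d => decide (d < c)) : Int))) := by
      intro c hc
      rw [aLoop_getD (fun d => (cs.count d : Int)) L PySem.Dict.empty k hk
        (PySem.List.sorted_ofList_pairwise_lt _)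
        (fun d hd => by
          have : d ∈ cs := (hmem d).mp hd
          have h1 : 1 ≤ cs.count d := List.count_pos_iff.mpr this
          show (1:Int) ≤ ((cs.count d : Nat) : Int)
          exact_mod_cast h1)
        (fun d _ => PySem.Dict.getD_empty ..)
        c ((hmem c).mpr hc)]
      rw [sum_filter_count]
    congr 1
    rw [emit_bridge cs k
        (fun c => min ((cs.count c : Int)) (max 0 (k - (cs.countP (fun d => decide (d < c)) : Int))))
        (bSmaller cs)
        (fun c hc => bSmaller_getD cs c hc)
        (fun c _ occ h0 hlt => by
          have hb : (0:Int) ≤ (cs.countP (fun d => decide (d < c)) : Int) := Int.natCast_nonneg _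
          beta_reduce
          omega)
        cs [] _ PySem.Dict.empty [] (by simp)
        (fun c hc => by
          rw [hT c hc]
          have hcnt : (0:Int) ≤ (cs.count c : Int) := Int.natCast_nonneg _
          beta_reduce
          simp only [List.count_nil, Nat.cast_zero]
          omega)
        (fun c _ => by
          rw [PySem.Dict.getD_empty]
          simp)]
    simp
  · -- k < 0: both keep everything
    replace hk : k < 0 := by omega
    have hmem : ∀ c, c ∈ PySem.List.sorted (PySem.Set.ofList s.toList) (fun x => x) false
        ↔ c ∈ s.toList := by
      intro c; rw [PySem.List.mem_sorted, PySem.Set.mem_ofList]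
    rcases hLtl : PySem.List.sorted (PySem.Set.ofList s.toList) (fun x => x) false with _ | ⟨c0, tl⟩
    · have hnil : s.toList = [] := by
        rcases hcsnil : s.toList with _ | ⟨c1, cs'⟩
        · rfl
        · have hm : c1 ∈ PySem.List.sorted (PySem.Set.ofList s.toList) (fun x => x) false :=
            (hmem c1).mpr (by rw [hcsnil]; simp)
          rw [hLtl] at hm; cases hm
      rw [hnil]
      rfl
    · have hc0 : c0 ∈ s.toList := (hmem c0).mp (by rw [hLtl]; simp)
      have hcnt0 : 1 ≤ (s.toList.count c0 : Int) := by
        have h1 := List.count_pos_iff.mpr hc0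
        exact_mod_cast h1
      have hmin : min k ((s.toList.count c0 : Int)) = k := min_eq_left (by omega)
      simp only [List.map_cons, aLoop, hmin]
      rw [if_pos (by simp)]
      rw [aEmit_keep_all s.toList _ [] (fun c hc => by
        by_cases hcc : c = c0
        · subst hcc; rw [PySem.Dict.getD_insert_self]; omega
        · rw [PySem.Dict.getD_insert, if_neg hcc, PySem.Dict.getD_empty])]
      rw [bGo_keep_all (bSmaller s.toList) k hk bSmaller_nonneg s.toList PySem.Dict.empty
        (fun c => by rw [PySem.Dict.getD_empty])]
      simp

-- ===== VERDICT (by name: the statement is the Claim_ definition above) =====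
theorem f_spec : Claim_equal_f := by
  unfold Claim_equal_f Spec_f
  exact fun s k _ => f_eq s k
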